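-- pv_equiv track=rewrite | github.com/alilotfi90/My-solutions-to-coding-challenge-problems | Finding_the_Boundary_with_Binary_Search.py | fbs
-- ===== SOURCE A (Python) =====
-- def fbs(arr):
-- 	left , right = 0 , len(arr)-1
-- 	bindex=-1
-- 	while left<=right:
-- 		mid=(left+right)//2
-- 		if arr[mid]:
-- 			right=mid-1
-- 			bindex=mid
-- 		else:
-- 			left=mid+1
-- 	return bindex
-- ===== SOURCE B (Python) =====
-- def fbs(arr):
--     def go(lo, hi):  # half-open [lo, hi); returns found index or None
--         if lo >= hi:
--             return None
--         mid = (lo + hi - 1) // 2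
--         if arr[mid]:
--             r = go(lo, mid)
--             return mid if r is None else r
--         return go(mid + 1, hi)
--     r = go(0, len(arr))
--     return -1 if r is None else r
-- ===== Notes on version B (the rewrite author's own statement) =====
-- stated objective: alternative
-- what changed: A's iterative while-loop with a mutable best-index accumulator over inclusive Int bounds is replaced by an Option-returning recursive search over half-open natural-number intervals [lo,hi) that recurses left of a truthy mid and yields mid only when the left half returns None.
import Mathlib
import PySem

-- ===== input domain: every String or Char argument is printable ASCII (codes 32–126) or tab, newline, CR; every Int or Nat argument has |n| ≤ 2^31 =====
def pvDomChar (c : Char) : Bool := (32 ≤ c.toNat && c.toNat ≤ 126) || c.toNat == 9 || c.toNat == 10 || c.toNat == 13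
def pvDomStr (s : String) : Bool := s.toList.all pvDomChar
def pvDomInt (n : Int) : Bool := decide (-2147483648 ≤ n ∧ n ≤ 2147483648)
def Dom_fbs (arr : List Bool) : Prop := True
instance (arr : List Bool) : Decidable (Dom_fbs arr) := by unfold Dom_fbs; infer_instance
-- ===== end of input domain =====

-- B replaces A's iterative while-loop (mutable best-index accumulator over inclusive Int
-- bounds) by an Option-returning recursion over half-open Nat intervals; same value, no speed claim.


-- ===== PORT A =====
-- the while-loop of A, state (left, right, bindex); arr[mid] is always in range,
-- so the .getD false default is never hit
def fbsLoop (arr : List Bool) (left right bindex : Int) : Int :=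
  if h : left ≤ right then
    let mid := PySem.Int.floordiv (left + right) 2
    if (PySem.List.pyGet? arr mid).getD false then
      fbsLoop arr left (mid - 1) mid
    else
      fbsLoop arr (mid + 1) right bindex
  else bindex
termination_by (right + 1 - left).toNat
decreasing_by
  · have := PySem.Int.floordiv_two_mid_bounds h; omega
  · have := PySem.Int.floordiv_two_mid_bounds h; omega

def fbs (arr : List Bool) : Int := fbsLoop arr 0 ((arr.length : Int) - 1) (-1)

-- ===== PORT B =====
-- B's helper go(lo, hi): half-open interval of Nat indices, Option result (None = not found)
def fbsGo (arr : List Bool) (lo hi : Nat) : Option Nat :=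
  if h : lo < hi then
    let mid := (lo + hi - 1) / 2
    if arr.getD mid false then
      match fbsGo arr lo mid with
      | none => some mid
      | some r => some r
    else
      fbsGo arr (mid + 1) hi
  else none
termination_by hi - lo
decreasing_by
  · omega
  · omega

def fbs_alt (arr : List Bool) : Int :=
  match fbsGo arr 0 arr.length with
  | none => -1
  | some r => (r : Int)

-- ===== PRECONDITION & SPEC =====
def Spec_fbs (arr : List Bool) (out : Int) : Prop := out = fbs_alt arr
instance (arr : List Bool) (out : Int) : Decidable (Spec_fbs arr out) := by unfold Spec_fbs; infer_instance

-- ===== CLAIM (what is proved, stated in full; the proofs are below) =====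
def Claim_equal_fbs : Prop := ∀ (arr : List Bool), Dom_fbs arr → Spec_fbs arr (fbs arr)

-- ===== LEMMAS AND PROOFS =====
-- A's loop on the inclusive Int interval [lo, hi-1] equals B's Option-valued recursion on
-- the half-open Nat interval [lo, hi), with the accumulator b as the 'none' fallback.
lemma fbsLoop_eq_go (arr : List Bool) :
    ∀ (n lo hi : Nat) (b : Int), hi - lo ≤ n →
      fbsLoop arr (lo : Int) ((hi : Int) - 1) b =
        (match fbsGo arr lo hi with
         | none => b
         | some r => (r : Int)) := by
  intro n
  induction n with
  | zero =>
    intro lo hi b hn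
    have hge : ¬ lo < hi := by omega
    rw [fbsLoop, fbsGo]
    have : ¬ ((lo : Int) ≤ (hi : Int) - 1) := by omega
    simp [this, hge]
  | succ n ih =>
    intro lo hi b hn
    by_cases hlt : lo < hi
    · have hle : (lo : Int) ≤ (hi : Int) - 1 := by omega
      rw [fbsLoop, fbsGo, dif_pos hle, dif_pos hlt]
      have hcast : (lo : Int) + ((hi : Int) - 1) = ((lo + hi - 1 : Nat) : Int) := by omega
      have hmid : PySem.Int.floordiv ((lo : Int) + ((hi : Int) - 1)) 2
          = (((lo + hi - 1) / 2 : Nat) : Int) := by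
        rw [hcast]; exact_mod_cast PySem.Int.floordiv_natCast (lo + hi - 1) 2
      simp only [hmid]
      set m : Nat := (lo + hi - 1) / 2 with hm
      have hget : (PySem.List.pyGet? arr (m : Int)).getD false = arr.getD m false := by
        simp [PySem.List.pyGet?_natCast, List.getD]
      rw [hget]
      by_cases ht : arr.getD m false
      · simp only [ht, if_true]
        rw [ih lo m (m : Int) (by omega)]
        cases fbsGo arr lo m <;> simp
      · simp only [ht, if_false, Bool.false_eq_true]
        have : (m : Int) + 1 = ((m + 1 : Nat) : Int) := by omega
        rw [this, ih (m + 1) hi b (by omega)]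
    · have : ¬ ((lo : Int) ≤ (hi : Int) - 1) := by omega
      rw [fbsLoop, fbsGo, dif_neg this, dif_neg hlt]

-- ===== VERDICT (by name: the statement is the Claim_ definition above) =====
theorem fbs_spec : Claim_equal_fbs := by
  intro arr _
  unfold Spec_fbs fbs fbs_alt
  have := fbsLoop_eq_go arr arr.length 0 arr.length (-1) (by omega)
  simpa using this
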